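-- pv_equiv track=rewrite | github.com/modal-projects/nmoe | nmoe/rl/rewards_harmony.py | _check_nesting
-- ===== SOURCE A (Python) =====
-- HARMONY_TOKENS = {
--     "start": "<|start|>",
--     "end": "<|end|>",
--     "message": "<|message|>",
--     "channel": "<|channel|>",
--     "call": "<|call|>",
--     "return": "<|return|>",
-- }
--
-- def _check_nesting(text: str) -> bool:
--     """Check if Harmony tokens are properly nested.
--
--     Valid: <|start|>...<|end|><|start|>...<|end|>
--     Invalid: <|start|><|start|>...<|end|> (nested)
--     Invalid: <|end|>...<|start|> (wrong order)
--     """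
--     start_token = HARMONY_TOKENS["start"]
--     end_token = HARMONY_TOKENS["end"]
--
--     depth = 0
--     pos = 0
--
--     while pos < len(text):
--         # Find next token
--         start_pos = text.find(start_token, pos)
--         end_pos = text.find(end_token, pos)
--
--         if start_pos == -1 and end_pos == -1:
--             break
--
--         if start_pos != -1 and (end_pos == -1 or start_pos < end_pos):
--             # Found start token
--             depth += 1
--             if depth > 1:
--                 return False  # Nested starts
--             pos = start_pos + len(start_token)
--         else:
--             # Found end token
--             depth -= 1
--             if depth < 0:
--                 return False  # End before start
--             pos = end_pos + len(end_token)
--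
--     return depth == 0  # All starts have matching ends
-- ===== SOURCE B (Python) =====
-- def _check_nesting(text: str) -> bool:
--     """Tokenize first, judge second: one left-to-right scan collects the
--     start/end token events, then a fold over the event list checks depth."""
--     start, end = "<|start|>", "<|end|>"
--     events = []
--     i, n = 0, len(text)
--     while i < n:
--         if text.startswith(start, i):
--             events.append(True)
--             i += len(start)
--         elif text.startswith(end, i):
--             events.append(False)
--             i += len(end)
--         else:
--             i += 1
--     depth = 0
--     for is_start in events:
--         depth += 1 if is_start else -1
--         if depth > 1 or depth < 0:
--             return False
--     return depth == 0
-- ===== Notes on version B (the rewrite author's own statement) =====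
-- stated objective: alternative
-- what changed: A interleaves depth tracking with repeated dual text.find rescans from the current position; B first tokenizes the text in a single left-to-right startswith scan into an ordered event list and then folds a depth counter over that list.
import Mathlib
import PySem

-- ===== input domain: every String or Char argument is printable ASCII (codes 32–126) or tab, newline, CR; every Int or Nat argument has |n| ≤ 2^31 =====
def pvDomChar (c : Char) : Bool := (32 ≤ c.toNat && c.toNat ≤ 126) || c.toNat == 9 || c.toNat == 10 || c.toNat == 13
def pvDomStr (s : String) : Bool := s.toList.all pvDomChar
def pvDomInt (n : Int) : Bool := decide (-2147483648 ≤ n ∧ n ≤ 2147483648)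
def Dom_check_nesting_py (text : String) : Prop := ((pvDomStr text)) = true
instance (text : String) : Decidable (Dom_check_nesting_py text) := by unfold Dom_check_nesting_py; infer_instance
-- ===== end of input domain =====

-- B tokenizes the text in one left-to-right scan into an event list and then folds a
-- depth counter over it, instead of A's interleaved dual text.find rescans (alternative
-- decomposition, same asymptotic cost).

-- ===== PORT A =====
-- the while loop, fuel = text.length + 1 (pos grows by ≥ 7 each iteration, so fuel never runs out)
def check_nesting_go (text : String) (fuel : Nat) (depth : Int) (pos : Int) : Bool :=
  match fuel with
  | 0 => false
  | fuel + 1 =>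
    if pos < PySem.Str.len text then
      let start_pos := PySem.Str.findFrom text "<|start|>" pos
      let end_pos := PySem.Str.findFrom text "<|end|>" pos
      if start_pos = -1 ∧ end_pos = -1 then depth == 0
      else if start_pos ≠ -1 ∧ (end_pos = -1 ∨ start_pos < end_pos) then
        if depth + 1 > 1 then false
        else check_nesting_go text fuel (depth + 1) (start_pos + 9)
      else
        if depth - 1 < 0 then false
        else check_nesting_go text fuel (depth - 1) (end_pos + 7)
    else depth == 0

def check_nesting_py (text : String) : Bool :=
  check_nesting_go text (text.toList.length + 1) 0 0

-- ===== PORT B =====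
-- phase 1 of Source B: the scanning while loop collecting events (true = start token, false = end token)
def tokensB : List Char → List Bool
  | [] => []
  | c :: rest =>
    if ['<', '|', 's', 't', 'a', 'r', 't', '|', '>'] <+: (c :: rest) then true :: tokensB ((c :: rest).drop 9)
    else if ['<', '|', 'e', 'n', 'd', '|', '>'] <+: (c :: rest) then false :: tokensB ((c :: rest).drop 7)
    else tokensB rest
termination_by l => l.length
decreasing_by
  all_goals (simp; try omega)

-- phase 2 of Source B: the for loop over the events
def runB : List Bool → Int → Bool
  | [], depth => depth == 0
  | e :: es, depth =>
    let depth' := if e then depth + 1 else depth - 1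
    if depth' > 1 ∨ depth' < 0 then false else runB es depth'

def check_nesting_py_alt (text : String) : Bool :=
  runB (tokensB text.toList) 0

-- ===== PRECONDITION & SPEC =====
def Spec_check_nesting_py (text : String) (out : Bool) : Prop := out = check_nesting_py_alt text
instance (text : String) (out : Bool) : Decidable (Spec_check_nesting_py text out) := by unfold Spec_check_nesting_py; infer_instance

-- ===== CLAIM (what is proved, stated in full; the proofs are below) =====
def Claim_equal_check_nesting_py : Prop := ∀ (text : String), Dom_check_nesting_py text → Spec_check_nesting_py text (check_nesting_py text)

-- ===== LEMMAS AND PROOFS =====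

lemma eS : ("<|start|>" : String).toList = ['<', '|', 's', 't', 'a', 'r', 't', '|', '>'] := rfl
lemma eE : ("<|end|>" : String).toList = ['<', '|', 'e', 'n', 'd', '|', '>'] := rfl

-- if sub occurs in c :: rest but not as a prefix, its first occurrence is the first one in rest, shifted
lemma find_cons_shift (c : Char) (rest sub : List Char)
    (hnp : ¬ sub <+: (c :: rest)) :
    PySem.Chars.find (c :: rest) sub =
      if PySem.Chars.find rest sub = -1 then -1 else 1 + PySem.Chars.find rest sub := by
  by_cases hr : PySem.Chars.find rest sub = -1
  · rw [if_pos hr]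
    rw [PySem.Chars.find_eq_neg_one_iff] at hr ⊢
    intro hinf
    apply hr
    obtain ⟨j, hj⟩ := (PySem.Chars.exists_prefix_drop_iff_isIn sub (c :: rest)).mpr
      ((PySem.Chars.isIn_iff_infix sub (c :: rest)).mpr hinf)
    match j, hj with
    | 0, hj => exact absurd (by simpa using hj) hnp
    | j + 1, hj =>
      rw [List.drop_succ_cons] at hj
      exact (PySem.Chars.isIn_iff_infix sub rest).mp
        ((PySem.Chars.exists_prefix_drop_iff_isIn sub rest).mp ⟨j, hj⟩)
  · have hm0 : 0 ≤ PySem.Chars.find rest sub := by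
      have := PySem.Chars.neg_one_le_find rest sub; omega
    obtain ⟨hp, hmin⟩ := PySem.Chars.find_spec hm0
    have hipfx : sub <+: (c :: rest).drop ((PySem.Chars.find rest sub).toNat + 1) := by
      rw [List.drop_succ_cons]; exact hp
    have hinf : 0 ≤ PySem.Chars.find (c :: rest) sub := by
      rw [PySem.Chars.find_nonneg_iff]
      exact (PySem.Chars.isIn_iff_infix sub (c :: rest)).mp
        ((PySem.Chars.exists_prefix_drop_iff_isIn sub (c :: rest)).mp ⟨_, hipfx⟩)
    obtain ⟨hp', hmin'⟩ := PySem.Chars.find_spec hinf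
    have h1 : (PySem.Chars.find (c :: rest) sub).toNat ≤ (PySem.Chars.find rest sub).toNat + 1 := by
      by_contra hlt
      exact hmin' _ (by omega) hipfx
    have h2 : (PySem.Chars.find (c :: rest) sub).toNat ≠ 0 := by
      intro h0
      rw [h0] at hp'
      exact hnp (by simpa using hp')
    have h3 : (PySem.Chars.find rest sub).toNat + 1 ≤ (PySem.Chars.find (c :: rest) sub).toNat := by
      by_contra hlt
      obtain ⟨f', hff⟩ : ∃ f', (PySem.Chars.find (c :: rest) sub).toNat = f' + 1 := ⟨_, (Nat.succ_pred_eq_of_pos (Nat.pos_of_ne_zero h2)).symm⟩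
      rw [hff, List.drop_succ_cons] at hp'
      exact hmin f' (by omega) hp'
    rw [if_neg hr]
    omega

-- a prefix occurrence is found at 0
lemma find_of_prefix (s sub : List Char) (h : sub <+: s) : PySem.Chars.find s sub = 0 := by
  have h0 : 0 ≤ PySem.Chars.find s sub := by
    rw [PySem.Chars.find_nonneg_iff]; exact h.isInfix
  obtain ⟨_, hmin⟩ := PySem.Chars.find_spec h0
  by_contra hne
  exact hmin 0 (by omega) (by simpa using h)

-- a prefix at 0 means find is 0, so if sub is not a prefix, find is not 0
lemma find_ne_zero_of_not_prefix (s sub : List Char) (h : ¬ sub <+: s) :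
    PySem.Chars.find s sub ≠ 0 := by
  intro h0
  obtain ⟨hp, _⟩ := PySem.Chars.find_spec (le_of_eq h0.symm)
  rw [h0] at hp
  exact h (by simpa using hp)

-- the two Harmony tokens are never both prefixes of the same list
lemma not_both_prefix (d : List Char) :
    ¬ (['<', '|', 's', 't', 'a', 'r', 't', '|', '>'] <+: d ∧ ['<', '|', 'e', 'n', 'd', '|', '>'] <+: d) := by
  rintro ⟨hs, he⟩
  rcases List.prefix_or_prefix_of_prefix hs he with h | h
  · exact absurd h (by decide)
  · exact absurd h (by decide)

-- trichotomy: what tokensB does, expressed through the two find values A looks at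
lemma firstTok (d : List Char) :
    (PySem.Chars.find d ['<', '|', 's', 't', 'a', 'r', 't', '|', '>'] = -1 ∧ PySem.Chars.find d ['<', '|', 'e', 'n', 'd', '|', '>'] = -1 ∧
      tokensB d = [])
  ∨ (∃ j : Nat, PySem.Chars.find d ['<', '|', 's', 't', 'a', 'r', 't', '|', '>'] = ↑j ∧
      (PySem.Chars.find d ['<', '|', 'e', 'n', 'd', '|', '>'] = -1 ∨ (↑j : Int) < PySem.Chars.find d ['<', '|', 'e', 'n', 'd', '|', '>']) ∧
      tokensB d = true :: tokensB (d.drop (j + 9)) ∧ j + 9 ≤ d.length)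
  ∨ (∃ j : Nat, PySem.Chars.find d ['<', '|', 'e', 'n', 'd', '|', '>'] = ↑j ∧
      (PySem.Chars.find d ['<', '|', 's', 't', 'a', 'r', 't', '|', '>'] = -1 ∨ (↑j : Int) < PySem.Chars.find d ['<', '|', 's', 't', 'a', 'r', 't', '|', '>']) ∧
      tokensB d = false :: tokensB (d.drop (j + 7)) ∧ j + 7 ≤ d.length) := by
  induction d using tokensB.induct with
  | case1 =>
    left
    refine ⟨?_, ?_, by simp [tokensB]⟩ <;>
      · rw [PySem.Chars.find_eq_neg_one_iff]
        simp
  | case2 c rest hS _ =>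
    right; left
    refine ⟨0, by simpa using find_of_prefix _ _ hS, ?_, ?_, by simpa using hS.length_le⟩
    · have hne : ¬ ['<', '|', 'e', 'n', 'd', '|', '>'] <+: (c :: rest) := fun he => not_both_prefix _ ⟨hS, he⟩
      have h1 := find_ne_zero_of_not_prefix _ _ hne
      have h2 := PySem.Chars.neg_one_le_find (c :: rest) ['<', '|', 'e', 'n', 'd', '|', '>']
      omega
    · rw [tokensB, if_pos hS]
  | case3 c rest hnS hE _ =>
    right; right
    refine ⟨0, by simpa using find_of_prefix _ _ hE, ?_, ?_, by simpa using hE.length_le⟩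
    · have h1 := find_ne_zero_of_not_prefix _ _ hnS
      have h2 := PySem.Chars.neg_one_le_find (c :: rest) ['<', '|', 's', 't', 'a', 'r', 't', '|', '>']
      omega
    · rw [tokensB, if_neg hnS, if_pos hE]
  | case4 c rest hnS hnE ih =>
    have hshS := find_cons_shift c rest _ hnS
    have hshE := find_cons_shift c rest _ hnE
    have htok : tokensB (c :: rest) = tokensB rest := by
      rw [tokensB, if_neg hnS, if_neg hnE]
    rcases ih with ⟨h1, h2, h3⟩ | ⟨j, hj, hord, htk, hlen⟩ | ⟨j, hj, hord, htk, hlen⟩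
    · left
      rw [hshS, hshE, if_pos h1, if_pos h2]
      exact ⟨rfl, rfl, by rw [htok, h3]⟩
    · right; left
      refine ⟨j + 1, ?_, ?_, ?_, by simpa using (by omega : j + 1 + 9 ≤ rest.length + 1)⟩
      · rw [hshS, hj, if_neg (by omega)]
        push_cast; ring
      · rcases hord with h | h
        · left; rw [hshE, if_pos h]
        · right
          have hEne : ¬ PySem.Chars.find rest ['<', '|', 'e', 'n', 'd', '|', '>'] = -1 := by omega
          rw [hshE, if_neg hEne]
          push_cast
          all_goals omega
      · rw [htok, htk]
        all_goals rw [show j + 1 + 9 = (j + 9) + 1 from by omega, List.drop_succ_cons]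
    · right; right
      refine ⟨j + 1, ?_, ?_, ?_, by simpa using (by omega : j + 1 + 7 ≤ rest.length + 1)⟩
      · rw [hshE, hj, if_neg (by omega)]
        push_cast; ring
      · rcases hord with h | h
        · left; rw [hshS, if_pos h]
        · right
          have hSne : ¬ PySem.Chars.find rest ['<', '|', 's', 't', 'a', 'r', 't', '|', '>'] = -1 := by omega
          rw [hshS, if_neg hSne]
          push_cast
          all_goals omega
      · rw [htok, htk]
        all_goals rw [show j + 1 + 7 = (j + 7) + 1 from by omega, List.drop_succ_cons]

lemma bridge (text : String) : ∀ (fuel k : Nat) (depth : Int),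
    k ≤ text.toList.length → text.toList.length - k < fuel → 0 ≤ depth → depth ≤ 1 →
    check_nesting_go text fuel depth ↑k = runB (tokensB (text.toList.drop k)) depth := by
  intro fuel
  induction fuel with
  | zero => intro k depth hk hf h0 h1; omega
  | succ fuel ih =>
    intro k depth hk hf h0 h1
    rw [check_nesting_go]
    have hlen : PySem.Str.len text = ↑(text.toList.length) := by
      simp [PySem.Str.len]
    by_cases hkl : k < text.toList.length
    · rw [if_pos (by rw [hlen]; exact_mod_cast hkl)]
      have hfS : PySem.Str.findFrom text "<|start|>" ↑k =
          (if PySem.Chars.find ((text.toList).drop k) ['<', '|', 's', 't', 'a', 'r', 't', '|', '>'] = -1 then (-1 : Int)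
            else ↑k + PySem.Chars.find ((text.toList).drop k) ['<', '|', 's', 't', 'a', 'r', 't', '|', '>']) := by
        rw [PySem.Str.findFrom_eq, eS, PySem.Chars.findFrom_natCast _ _ k hk]
      have hfE : PySem.Str.findFrom text "<|end|>" ↑k =
          (if PySem.Chars.find ((text.toList).drop k) ['<', '|', 'e', 'n', 'd', '|', '>'] = -1 then (-1 : Int)
            else ↑k + PySem.Chars.find ((text.toList).drop k) ['<', '|', 'e', 'n', 'd', '|', '>']) := by
        rw [PySem.Str.findFrom_eq, eE, PySem.Chars.findFrom_natCast _ _ k hk]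
      rcases firstTok (text.toList.drop k) with ⟨hS, hE, htok⟩ | ⟨j, hj, hord, htk, hjl⟩ | ⟨j, hj, hord, htk, hjl⟩
      · rw [hfS, hfE, if_pos hS, if_pos hE, if_pos ⟨rfl, rfl⟩, htok]
        rfl
      · have hSv : PySem.Str.findFrom text "<|start|>" ↑k = ↑k + ↑j := by
          rw [hfS, hj, if_neg (by omega)]
        have hEv := hfE
        rw [hSv]
        rw [if_neg ?hc1]
        case hc1 =>
          rintro ⟨hc, -⟩
          omega
        rw [if_pos ?hc2]
        case hc2 =>
          refine ⟨by omega, ?_⟩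
          rcases hord with h | h
          · left; rw [hEv, if_pos (by rw [h])]
          · right
            rw [hEv, hj] at *
            rw [if_neg (by omega)]
            omega
        rw [htk]
        rw [runB]
        simp only [if_true]
        by_cases hd : depth + 1 > 1
        · rw [if_pos hd]
          all_goals rw [if_pos (show _ ∨ _ from by omega)]
        · rw [if_neg hd, if_neg (by omega)]
          have hlen9 : (text.toList.length : Int) ≥ ↑(k + j + 9) := by
            have := List.length_drop (l := text.toList) (i := k)
            omega
          have harg : (↑k + ↑j + 9 : Int) = ↑(k + (j + 9)) := by push_cast; ring
          rw [harg, ih (k + (j + 9)) (depth + 1) (by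
              have := List.length_drop (l := text.toList) (i := k); omega)
            (by omega) (by omega) (by omega), List.drop_drop]
      · have hEv : PySem.Str.findFrom text "<|end|>" ↑k = ↑k + ↑j := by
          rw [hfE, hj, if_neg (by omega)]
        have hSv := hfS
        rw [if_neg ?hd1]
        case hd1 =>
          rintro ⟨-, hc⟩
          rw [hEv] at hc
          omega
        rw [if_neg ?hd2]
        case hd2 =>
          rintro ⟨hne, hor⟩
          rcases hord with h | h
          · rw [hSv, if_pos h] at hne
            exact hne rfl
          · have hSne : ¬ PySem.Chars.find (text.toList.drop k) ['<', '|', 's', 't', 'a', 'r', 't', '|', '>'] = -1 := by omega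
            rw [hSv, if_neg hSne] at hne hor
            rcases hor with hc | hc
            · rw [hEv] at hc; omega
            · rw [hEv] at hc; omega
        rw [hEv, htk, runB]
        simp only [Bool.false_eq_true, if_false]
        by_cases hd : depth - 1 < 0
        · rw [if_pos hd]
          all_goals rw [if_pos (show _ ∨ _ from by omega)]
        · rw [if_neg hd, if_neg (by omega)]
          have harg : (↑k + ↑j + 7 : Int) = ↑(k + (j + 7)) := by push_cast; ring
          rw [harg, ih (k + (j + 7)) (depth - 1) (by
              have := List.length_drop (l := text.toList) (i := k); omega)
            (by omega) (by omega) (by omega), List.drop_drop]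
    · have hke : k = text.toList.length := by omega
      rw [if_neg (by rw [hlen]; exact_mod_cast (by omega : ¬ (k:Int) < (text.toList.length : Int)))]
      rw [hke, List.drop_length]
      simp [tokensB, runB]

-- ===== VERDICT (by name: the statement is the Claim_ definition above) =====
theorem check_nesting_py_spec : Claim_equal_check_nesting_py := by
  intro text _
  unfold Spec_check_nesting_py check_nesting_py check_nesting_py_alt
  have h := bridge text (text.toList.length + 1) 0 0 (Nat.zero_le _) (by omega) le_rfl (by norm_num)
  simpa using h
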